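-- pv_equiv track=rewrite | github.com/gagileo/epanet-failure-modes | py/pomocne_funkcije_prepravka-checkpoint.py | getBlokAtrib
-- ===== SOURCE A (Python) =====
-- def getBlokAtrib(blok):  # ! Sredjeno - TESTIRATI
--     """
--     :param  blok: list - Lista sa podacima bloka (npr. [JUNCTIONS],...)
--     :return     : list - Vraca listu atributa iz zaglavlja bloka.
--
--     : info:
--     Vazi samo za SWMM-inp fajl, NE i za EPANET!!!
--
--     """
--     # Izbacivanje ;; i \n i dodavanje " " (space) jer se javlja neki bug bez ovoga!!!
--     atr_str = blok[1][2:-1] + " "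
--     atr_str = atr_str.split(' ')  # Razdvajanje stringa
--
--     # Spajamo stringove ako su odvojeni, npr 'From', 'Node' -> 'From Node'
--     # ----------------------------------------------------------------------
--     pom1 = []
--
--     for i in range(0, len(atr_str) - 1):
--
--         if len(atr_str[i]) != 0 and len(atr_str[i + 1]) != 0:
--             pom1.append(atr_str[i] + ' ' + atr_str[i + 1])
--
--         else:
--             pom1.append(atr_str[i])
--
--     # Indekse u listi gde se nalaze "viskovi"
--     # ----------------------------------------
--     pom2 = []
--
--     for i in range(0, len(pom1) - 1):
--
--         if len(pom1[i]) != 0 and len(pom1[i + 1]) != 0: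
--             pom2.append(i + 1)
--
--     # Prebacivanje vrednosti visaka u ''
--     for i in pom2:
--         pom1[i] = ''
--
--     # KONACNO - izbacujemo sve elemente -> ''
--     atr_lsp = [i for i in pom1 if i != '']
--
--     return atr_lsp
-- ===== SOURCE B (Python) =====
-- def getBlokAtrib(blok):
--     tokens = (blok[1][2:-1] + " ").split(' ')
--     out = []
--     run = []
--     for t in tokens:
--         if t:
--             run.append(t)
--         else:
--             if run:
--                 out.append(run[0] if len(run) == 1 else run[0] + ' ' + run[1])
--             run = []
--     if run:
--         out.append(run[0] if len(run) == 1 else run[0] + ' ' + run[1])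
--     return out
-- ===== Notes on version B (the rewrite author's own statement) =====
-- stated objective: simpler
-- what changed: A's three-phase pipeline (join every adjacent non-empty token pair, then mark the redundant joined copies by index, then blank and filter them out) is replaced by a single pass that groups consecutive non-empty tokens into runs and emits one element per run (the token itself, or the first two tokens joined).
import Mathlib
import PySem

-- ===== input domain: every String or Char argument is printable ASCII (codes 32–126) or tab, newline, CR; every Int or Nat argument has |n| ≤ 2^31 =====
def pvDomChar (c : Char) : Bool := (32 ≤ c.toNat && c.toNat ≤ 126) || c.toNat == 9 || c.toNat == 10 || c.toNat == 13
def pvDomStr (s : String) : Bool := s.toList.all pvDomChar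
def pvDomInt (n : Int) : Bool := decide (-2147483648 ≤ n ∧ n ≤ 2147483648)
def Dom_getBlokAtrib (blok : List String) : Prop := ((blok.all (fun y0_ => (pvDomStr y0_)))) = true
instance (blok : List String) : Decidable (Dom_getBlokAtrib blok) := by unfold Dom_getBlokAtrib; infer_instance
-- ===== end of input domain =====

-- B replaces A's three passes (join adjacent pairs / mark redundant indices / filter) by one
-- grouping pass over the tokens that flushes each run of non-empty tokens as a single element
-- (objective: simpler, one pass instead of three).

-- ===== PORT A =====
-- Port of A, working on List Char (PySem.Chars) for the string contents; the header string
-- blok[1][2:-1] + " " is `PySem.Chars.slice s.toList (some 2) (some (-1)) ++ [' ']`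
-- (exact by PySem.Str.toList_slice) and .split(' ') is PySem.Chars.splitOn · [' '].
def getBlokAtrib (blok : List String) : List String :=
  let s := PySem.List.pyGetD blok 1 ""        -- blok[1]; Pre_ guarantees the index is in range
  let atrStr : List (List Char) :=
    PySem.Chars.splitOn (PySem.Chars.slice s.toList (some 2) (some (-1)) ++ [' ']) [' ']
  -- for i in range(0, len(atr_str) - 1): join adjacent non-empty tokens
  let pom1 : List (List Char) :=
    (PySem.List.pyRange 0 ((atrStr.length : Int) - 1) 1).foldl (fun acc i =>
      if (PySem.List.pyGetD atrStr i []).length ≠ 0 ∧ (PySem.List.pyGetD atrStr (i + 1) []).length ≠ 0 then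
        acc ++ [PySem.List.pyGetD atrStr i [] ++ [' '] ++ PySem.List.pyGetD atrStr (i + 1) []]
      else
        acc ++ [PySem.List.pyGetD atrStr i []]) []
  -- for i in range(0, len(pom1) - 1): collect the indices of the redundant copies
  let pom2 : List Int :=
    (PySem.List.pyRange 0 ((pom1.length : Int) - 1) 1).foldl (fun acc i =>
      if (PySem.List.pyGetD pom1 i []).length ≠ 0 ∧ (PySem.List.pyGetD pom1 (i + 1) []).length ≠ 0 then
        acc ++ [i + 1]
      else acc) []
  -- for i in pom2: pom1[i] = ''
  let pom1' := pom2.foldl (fun l i => PySem.List.pySetD l i ([] : List Char)) pom1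
  -- [i for i in pom1 if i != '']
  ((pom1'.filter (fun x => x ≠ [])).map (fun cs => String.ofList cs))

-- ===== PORT B =====
-- out.append(run[0] if len(run) == 1 else run[0] + ' ' + run[1])  (nothing for an empty run)
def pvFlush (run : List (List Char)) : List (List Char) :=
  match run with
  | [] => []
  | [a] => [a]
  | a :: b :: _ => [a ++ [' '] ++ b]

-- the token loop of B: grow the current run on a non-empty token, flush it on an empty one,
-- flush the leftover run after the loop
def pvBGo (run : List (List Char)) : List (List Char) → List (List Char)
  | [] => pvFlush run
  | t :: rest => if t ≠ [] then pvBGo (run ++ [t]) rest else pvFlush run ++ pvBGo [] rest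

def getBlokAtrib_alt (blok : List String) : List String :=
  let s := PySem.List.pyGetD blok 1 ""
  let tokens : List (List Char) :=
    PySem.Chars.splitOn (PySem.Chars.slice s.toList (some 2) (some (-1)) ++ [' ']) [' ']
  (pvBGo [] tokens).map (fun cs => String.ofList cs)

-- ===== PRECONDITION & SPEC =====
-- Python A evaluates blok[1] and raises IndexError when blok has fewer than two elements.
def Pre_getBlokAtrib (blok : List String) : Prop := 2 ≤ blok.length
instance (blok : List String) : Decidable (Pre_getBlokAtrib blok) := by unfold Pre_getBlokAtrib; infer_instance
def pvWitness_getBlokAtrib : List String := ["[JUNCTIONS]", ";;Name            Elev       "]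

def Spec_getBlokAtrib (blok : List String) (out : List String) : Prop := out = getBlokAtrib_alt blok
instance (blok : List String) (out : List String) : Decidable (Spec_getBlokAtrib blok out) := by unfold Spec_getBlokAtrib; infer_instance

-- ===== CLAIM (what is proved, stated in full; the proofs are below) =====
def Claim_equal_getBlokAtrib : Prop := ∀ (blok : List String), Dom_getBlokAtrib blok → Pre_getBlokAtrib blok → Spec_getBlokAtrib blok (getBlokAtrib blok)

-- ===== LEMMAS AND PROOFS =====

-- A's three phases as functions of the token list

def pvF (a b : List Char) : List Char :=
  if a.length ≠ 0 ∧ b.length ≠ 0 then a ++ [' '] ++ b else a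

def pvPairMap : List (List Char) → List (List Char)
  | a :: b :: r => pvF a b :: pvPairMap (b :: r)
  | _ => []

def pvMarkAux (p : List Char) : List (List Char) → List (List Char)
  | [] => []
  | x :: r => (if p.length ≠ 0 ∧ x.length ≠ 0 then ([] : List Char) else x) :: pvMarkAux x r

def pvMark (l : List (List Char)) : List (List Char) := pvMarkAux [] l

def pvSkipGo : List (List Char) → List (List Char)
  | [] => []
  | t :: rest => if t = [] then pvBGo [] rest else pvSkipGo rest

theorem pv_splitOn_go_space (l : List Char) (f : Nat) (cur : List Char) (acc : List (List Char))
    (h : l.length ≤ f) :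
    PySem.Chars.splitOn.go [' '] (f + 1) (l ++ [' ']) cur acc
      = PySem.Chars.splitOn.go [' '] f l cur acc ++ [[]] := by
  induction l generalizing f cur acc with
  | nil => cases f <;> simp [PySem.Chars.splitOn.go, List.isPrefixOf]
  | cons c rest ih =>
    simp only [List.length_cons] at h
    obtain ⟨g, rfl⟩ : ∃ g, f = g + 1 := ⟨f - 1, by omega⟩
    by_cases hc : ' ' = c <;>
      simp [PySem.Chars.splitOn.go, List.isPrefixOf, hc, ih _ _ _ (by omega : rest.length ≤ g)] <;>
        (split <;> rfl)

theorem pv_splitOn_space (l : List Char) :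
    PySem.Chars.splitOn (l ++ [' ']) [' '] = PySem.Chars.splitOn l [' '] ++ [[]] := by
  unfold PySem.Chars.splitOn
  rw [show (l ++ [' ']).length + 1 = (l.length + 1) + 1 by simp]
  exact pv_splitOn_go_space l (l.length + 1) [] [] (by omega)

theorem pv_pairmap_nat (xs : List (List Char)) :
    (List.range (xs.length - 1)).map (fun i =>
      if (xs.getD i []).length ≠ 0 ∧ (xs.getD (i + 1) []).length ≠ 0 then
        xs.getD i [] ++ [' '] ++ xs.getD (i + 1) []
      else xs.getD i []) = pvPairMap xs := by
  match xs with
  | [] => simp [pvPairMap]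
  | [a] => simp [pvPairMap]
  | a :: b :: r =>
    have h : (a :: b :: r).length - 1 = (b :: r).length - 1 + 1 := by simp
    rw [h, List.range_succ_eq_map, List.map_cons, List.map_map]
    have hmap : List.map ((fun i =>
        if ((a::b::r).getD i []).length ≠ 0 ∧ ((a::b::r).getD (i + 1) []).length ≠ 0 then
          (a::b::r).getD i [] ++ [' '] ++ (a::b::r).getD (i + 1) []
        else (a::b::r).getD i []) ∘ Nat.succ) (List.range ((b::r).length - 1))
        = List.map (fun i =>
        if ((b::r).getD i []).length ≠ 0 ∧ ((b::r).getD (i + 1) []).length ≠ 0 then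
          (b::r).getD i [] ++ [' '] ++ (b::r).getD (i + 1) []
        else (b::r).getD i []) (List.range ((b::r).length - 1)) := by
      apply List.map_congr_left
      intro i hi
      simp [Nat.succ_eq_add_one]
    rw [hmap, pv_pairmap_nat (b :: r)]
    simp [pvPairMap, pvF]

theorem pv_pom1_eq (xs : List (List Char)) :
    (PySem.List.pyRange 0 ((xs.length : Int) - 1) 1).foldl (fun acc i =>
      if (PySem.List.pyGetD xs i []).length ≠ 0 ∧ (PySem.List.pyGetD xs (i + 1) []).length ≠ 0 then
        acc ++ [PySem.List.pyGetD xs i [] ++ [' '] ++ PySem.List.pyGetD xs (i + 1) []]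
      else
        acc ++ [PySem.List.pyGetD xs i []]) [] = pvPairMap xs := by
  rw [PySem.List.foldl_congr_mem _ _ (fun acc i =>
      acc ++ [if (PySem.List.pyGetD xs i []).length ≠ 0 ∧ (PySem.List.pyGetD xs (i + 1) []).length ≠ 0 then
        PySem.List.pyGetD xs i [] ++ [' '] ++ PySem.List.pyGetD xs (i + 1) []
      else PySem.List.pyGetD xs i []]) _ (by
    intro acc i _
    exact (apply_ite (fun x => acc ++ [x]) _ _ _).symm)]
  rw [PySem.List.foldl_append_singleton_eq_map, List.nil_append]
  cases xs with
  | nil => decide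
  | cons a t =>
    have h : ((a :: t).length : Int) - 1 = (((a :: t).length - 1 : Nat) : Int) := by simp
    rw [h, PySem.List.pyRange_zero_natCast, List.map_map]
    rw [← pv_pairmap_nat (a :: t)]
    apply List.map_congr_left
    intro i hi
    simp only [Function.comp_apply]
    rw [show ((i : Nat) : Int) + 1 = (((i + 1 : Nat)) : Int) by push_cast; ring,
      PySem.List.pyGetD_natCast, PySem.List.pyGetD_natCast]

theorem pv_markAux_length (l : List (List Char)) (p : List Char) :
    (pvMarkAux p l).length = l.length := by
  induction l generalizing p with
  | nil => rfl
  | cons x r ih => simp [pvMarkAux, ih]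

theorem pv_markAux_getElem (l : List (List Char)) (p : List Char) (j : Nat) (hj : j < l.length) :
    (pvMarkAux p l)[j]'(by rw [pv_markAux_length]; exact hj) =
      if ((if j = 0 then p else l.getD (j - 1) []).length ≠ 0 ∧ (l[j]'hj).length ≠ 0) then []
      else l[j]'hj := by
  induction l generalizing p j with
  | nil => simp at hj
  | cons x r ih =>
    cases j with
    | zero => simp [pvMarkAux]
    | succ k =>
      have hk : k < r.length := by simpa using hj
      have := ih x k hk
      have hgd : (x :: r).getD k [] = if k = 0 then x else r.getD (k - 1) [] := by
        cases k <;> simp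
      simp only [pvMarkAux, Nat.succ_sub_one]
      rw [List.getElem_cons_succ, this]
      cases k <;> simp

theorem pv_foldl_set {α : Type} (v : α) (idxs : List Nat) (l : List α)
    (hb : ∀ i ∈ idxs, i < l.length) :
    (idxs.map (fun i : Nat => (i : Int))).foldl (fun m i => PySem.List.pySetD m i v) l
      = l.mapIdx (fun j x => if j ∈ idxs then v else x) := by
  induction idxs generalizing l with
  | nil =>
    apply List.ext_getElem <;> simp
  | cons i rest ih =>
    have hi : i < l.length := hb i (by simp)
    rw [List.map_cons, List.foldl_cons,
      show PySem.List.pySetD l (i : Int) v = l.set i v by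
        simp [PySem.List.pySetD, PySem.List.pySet?_natCast _ _ _ hi],
      ih (l.set i v) (by intro x hx; rw [List.length_set]; exact hb x (by simp [hx]))]
    apply List.ext_getElem
    · simp
    · intro j h1 h2
      simp only [List.getElem_mapIdx, List.getElem_set, List.mem_cons]
      have hj : j < l.length := by simpa using h2
      by_cases hji : i = j <;> by_cases hjr : j ∈ rest <;> simp [hji, hjr] <;> tauto

theorem pv_mark_eq (l : List (List Char)) :
    (((PySem.List.pyRange 0 ((l.length : Int) - 1) 1).foldl (fun acc i =>
      if (PySem.List.pyGetD l i []).length ≠ 0 ∧ (PySem.List.pyGetD l (i + 1) []).length ≠ 0 then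
        acc ++ [i + 1]
      else acc) []).foldl (fun m i => PySem.List.pySetD m i ([] : List Char)) l) = pvMark l := by
  rw [PySem.List.foldl_append_ite
    (fun i => (PySem.List.pyGetD l i []).length ≠ 0 ∧ (PySem.List.pyGetD l (i + 1) []).length ≠ 0)
    (fun i => i + 1), List.nil_append]
  -- move the index computation to Nat
  have hrange : PySem.List.pyRange 0 ((l.length : Int) - 1) 1
      = (List.range (l.length - 1)).map (fun k : Nat => (k : Int)) := by
    cases l with
    | nil => decide
    | cons a t =>
      rw [show ((a :: t).length : Int) - 1 = (((a :: t).length - 1 : Nat) : Int) by simp,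
        PySem.List.pyRange_zero_natCast]
  rw [hrange, List.filter_map, List.map_map]
  have hfil : List.filter ((fun i : Int => decide ((PySem.List.pyGetD l i []).length ≠ 0 ∧ (PySem.List.pyGetD l (i + 1) []).length ≠ 0)) ∘ (fun k : Nat => (k : Int))) (List.range (l.length - 1))
      = List.filter (fun k => decide ((l.getD k []).length ≠ 0 ∧ (l.getD (k + 1) []).length ≠ 0)) (List.range (l.length - 1)) := by
    apply List.filter_congr
    intro k hk
    simp only [Function.comp_apply]
    rw [show ((k : Nat) : Int) + 1 = (((k + 1 : Nat)) : Int) by push_cast; ring,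
      PySem.List.pyGetD_natCast, PySem.List.pyGetD_natCast]
  rw [hfil]
  set F := List.filter (fun k => decide ((l.getD k []).length ≠ 0 ∧ (l.getD (k + 1) []).length ≠ 0)) (List.range (l.length - 1)) with hF
  have hmapstep : List.map ((fun i : Int => i + 1) ∘ (fun k : Nat => (k : Int))) F
      = List.map (fun i : Nat => (i : Int)) (F.map (fun k => k + 1)) := by
    rw [List.map_map]
    apply List.map_congr_left
    intro k _
    simp
  rw [hmapstep, pv_foldl_set _ _ _ (by
    intro i hi
    simp only [List.mem_map, hF, List.mem_filter, List.mem_range] at hi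
    obtain ⟨k, ⟨hk1, _⟩, rfl⟩ := hi
    omega)]
  -- pointwise comparison with pvMark
  apply List.ext_getElem
  · simp [pv_markAux_length, pvMark]
  · intro j h1 h2
    have hj : j < l.length := by simpa [pvMark, pv_markAux_length] using h2
    simp only [pvMark]
    rw [List.getElem_mapIdx, pv_markAux_getElem l [] j hj]
    cases j with
    | zero =>
      simp only [List.mem_map, hF, List.mem_filter, List.mem_range]
      simp
    | succ k =>
      have hmem : (k + 1 ∈ F.map (fun k => k + 1)) ↔
          ((l.getD k []).length ≠ 0 ∧ (l.getD (k + 1) []).length ≠ 0) := by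
        simp only [List.mem_map, hF, List.mem_filter, List.mem_range]
        constructor
        · rintro ⟨i, ⟨_, hp⟩, hi⟩
          have : i = k := by omega
          subst this
          simpa using hp
        · intro hp
          exact ⟨k, ⟨by omega, by simpa using hp⟩, rfl⟩
      rw [show (if k + 1 ∈ F.map (fun k => k + 1) then ([] : List Char) else l[k+1]'hj)
          = (if ((l.getD k []).length ≠ 0 ∧ (l.getD (k + 1) []).length ≠ 0) then ([] : List Char) else l[k+1]'hj) by
        by_cases h : (l.getD k []).length ≠ 0 ∧ (l.getD (k + 1) []).length ≠ 0 <;> simp [hmem]]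
      simp [List.getElem?_eq_getElem hj]

theorem pv_bgo_run (ts : List (List Char)) (h : ts.getLast? = some []) (a b : List Char)
    (r : List (List Char)) : pvBGo (a :: b :: r) ts = (a ++ [' '] ++ b) :: pvSkipGo ts := by
  induction ts generalizing r with
  | nil => simp at h
  | cons t rest ih =>
    by_cases ht : t = []
    · subst ht
      simp [pvBGo, pvSkipGo, pvFlush]
    · have hrest : rest ≠ [] := by
        rintro rfl
        exact ht (by simpa using h)
      have h' : rest.getLast? = some [] := by
        cases rest with
        | nil => exact absurd rfl hrest
        | cons c r => simpa [List.getLast?_cons_cons] using h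
      have := ih h' (r := r ++ [t])
      simp only [pvBGo, if_pos ht, pvSkipGo, if_neg ht]
      simpa using this

theorem pv_main (n : Nat) : ∀ (ts : List (List Char)), ts.length ≤ n → ts.getLast? = some [] →
    ((pvMark (pvPairMap ts)).filter (fun x => x ≠ []) = pvBGo [] ts ∧
     ∀ q : List Char, q ≠ [] → (pvMarkAux q (pvPairMap ts)).filter (fun x => x ≠ []) = pvSkipGo ts) := by
  induction n with
  | zero =>
    intro ts hlen h
    cases ts with
    | nil => simp at h
    | cons a r => simp at hlen
  | succ n ih =>
    intro ts hlen h
    cases ts with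
    | nil => simp at h
    | cons t rest =>
      cases rest with
      | nil =>
        have ht : t = [] := by simpa using h
        subst ht
        refine ⟨by simp [pvPairMap, pvMark, pvMarkAux, pvBGo, pvFlush], ?_⟩
        intro q hq
        simp [pvPairMap, pvMarkAux, pvSkipGo, pvBGo, pvFlush]
      | cons c rest' =>
        have h' : (c :: rest').getLast? = some [] := by
          simpa [List.getLast?_cons_cons] using h
        have hlen' : (c :: rest').length ≤ n := by simpa using hlen
        have IH := ih (c :: rest') hlen' h'
        by_cases ht : t = []
        · subst ht
          constructor
          · simp [pvPairMap, pvF, pvMark, pvMarkAux, pvBGo, pvFlush] at IH ⊢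
            exact IH.1
          · intro q hq
            simp [pvPairMap, pvF, pvMark, pvMarkAux, pvSkipGo, pvBGo, pvFlush, hq] at IH ⊢
            exact IH.1
        · by_cases hc : c = []
          · subst hc
            have hFt : pvF t [] = t := by simp [pvF]
            cases rest' with
            | nil =>
              refine ⟨?_, ?_⟩
              · simp [pvPairMap, pvMark, pvMarkAux, pvBGo, pvFlush, hFt, ht]
              · intro q hq
                simp [pvPairMap, pvMarkAux, pvSkipGo, pvBGo, pvFlush, hFt, ht, hq]
            | cons d rest'' =>
              have h'' : (d :: rest'').getLast? = some [] := by
                simpa [List.getLast?_cons_cons] using h'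
              have IH2 := ih (d :: rest'') (by simp at hlen ⊢; omega) h''
              have hPP : pvPairMap ([] :: d :: rest'') = [] :: pvPairMap (d :: rest'') := by
                simp [pvPairMap, pvF]
              refine ⟨?_, ?_⟩
              · simp [pvPairMap, pvMark, pvMarkAux, pvBGo, pvFlush, hFt, ht] at IH2 ⊢
                exact IH2.1
              · intro q hq
                simp [pvPairMap, pvMark, pvMarkAux, pvSkipGo, pvBGo, pvFlush, hFt, ht, hq] at IH2 ⊢
                exact IH2.1
          · have hFtc : pvF t c = t ++ [' '] ++ c := by
              simp [pvF, ht, hc]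
            have hF : pvF t c ≠ [] := by simp [hFtc]
            have hrest' : rest' ≠ [] := by
              rintro rfl
              exact hc (by simpa using h')
            have h'' : rest'.getLast? = some [] := by
              cases rest' with
              | nil => exact absurd rfl hrest'
              | cons d r => simpa [List.getLast?_cons_cons] using h'
            have hrun := pv_bgo_run rest' h'' t c []
            refine ⟨?_, ?_⟩
            · have := IH.2 (pvF t c) hF
              simp [pvPairMap, pvMark, pvMarkAux, pvBGo, ht, hc, hFtc] at this ⊢
              rw [this, hrun]
              simp [pvSkipGo, hc]
            · intro q hq
              have := IH.2 (pvF t c) hF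
              simp [pvPairMap, pvMarkAux, pvSkipGo, ht, hc, hFtc, hq] at this ⊢
              exact this

-- ===== VERDICT (by name: the statement is the Claim_ definition above) =====
theorem getBlokAtrib_spec : Claim_equal_getBlokAtrib := by
  intro blok _ _
  unfold Spec_getBlokAtrib getBlokAtrib getBlokAtrib_alt
  dsimp only
  rw [pv_splitOn_space]
  set ts0 := PySem.Chars.splitOn (PySem.Chars.slice (PySem.List.pyGetD blok 1 "").toList (some 2) (some (-1))) [' '] with hts0
  have hlast : (ts0 ++ [[]]).getLast? = some ([] : List Char) := List.getLast?_concat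
  have main := (pv_main (ts0 ++ [[]]).length (ts0 ++ [[]]) le_rfl hlast).1
  rw [pv_pom1_eq (ts0 ++ [[]]), pv_mark_eq (pvPairMap (ts0 ++ [[]])), main]
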